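-- pv_equiv track=rewrite | github.com/Sanqiang/wsd | preprocess/dataset/umn.py | sense_inventory_umn
-- ===== SOURCE A (Python) =====
-- from collections import defaultdict
--
-- def sense_inventory_umn(instance_list):
--     sense_inventory = defaultdict(list)
--     for items in instance_list:
--         abbr = items[0]
--         sense = items[1]
--         if sense not in sense_inventory[abbr]:
--             sense_inventory[abbr].append(sense)
--     return sense_inventory
-- ===== SOURCE B (Python) =====
-- from collections import defaultdict
--
-- def sense_inventory_umn(instance_list):
--     # distinct abbreviations in first-seen order, then one filtered dedup pass per abbreviation
--     abbrs = list(dict.fromkeys(items[0] for items in instance_list))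
--     return defaultdict(list, (
--         (a, list(dict.fromkeys(items[1] for items in instance_list if items[0] == a)))
--         for a in abbrs))
-- ===== Notes on version B (the rewrite author's own statement) =====
-- stated objective: alternative
-- what changed: Replaces A's single incremental pass (a growing defaultdict with dedup-on-insert) by a two-stage comprehension: first compute the distinct abbreviations in first-seen order, then for each abbreviation independently filter the rows and deduplicate its senses with dict.fromkeys; no dict is mutated while scanning.
import Mathlib
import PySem

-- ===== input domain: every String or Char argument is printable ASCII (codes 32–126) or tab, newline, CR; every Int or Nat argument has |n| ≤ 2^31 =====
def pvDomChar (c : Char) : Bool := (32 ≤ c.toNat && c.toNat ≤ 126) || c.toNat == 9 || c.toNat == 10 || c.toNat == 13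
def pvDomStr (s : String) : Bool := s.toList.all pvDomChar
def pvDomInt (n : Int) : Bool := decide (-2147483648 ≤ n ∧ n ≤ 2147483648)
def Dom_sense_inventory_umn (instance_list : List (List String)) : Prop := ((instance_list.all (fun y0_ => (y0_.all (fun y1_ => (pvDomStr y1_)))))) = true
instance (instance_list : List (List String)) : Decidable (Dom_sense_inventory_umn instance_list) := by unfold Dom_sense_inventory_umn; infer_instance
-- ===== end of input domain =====

-- B replaces A's incremental dedup-on-insert dict by a two-stage comprehension: distinct
-- abbreviations first, then an independent filter+dedup per abbreviation ('alternative').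

-- ===== PORT A =====
-- loop body of A: abbr = items[0]; sense = items[1]; if sense not in sense_inventory[abbr]: append
def stepA (d : PySem.Dict String (List String)) (items : List String) : PySem.Dict String (List String) :=
  match PySem.List.pyGet? items 0, PySem.List.pyGet? items 1 with
  | some abbr, some sense =>
      let cur := d.getD abbr []
      let d' := d.setdefault abbr []      -- defaultdict: sense_inventory[abbr] creates [] if absent
      if sense ∈ cur then d' else d'.insert abbr (cur ++ [sense])
  | _, _ => d                             -- unreachable under Pre_ (Python raises IndexError)

def sense_inventory_umn (instance_list : List (List String)) : List (String × List String) :=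
  (instance_list.foldl stepA PySem.Dict.empty).items

-- ===== PORT B =====
-- items[0] / items[1]; under Pre_ every row has ≥ 2 fields, so the defaults are never used
def fld0 (items : List String) : String := (PySem.List.pyGet? items 0).getD ""
def fld1 (items : List String) : String := (PySem.List.pyGet? items 1).getD ""

def sense_inventory_umn_alt (instance_list : List (List String)) : List (String × List String) :=
  let abbrs := PySem.List.dedup (instance_list.map fld0)
  abbrs.map (fun a =>
    (a, PySem.List.dedup ((instance_list.filter (fun items => fld0 items == a)).map fld1)))

-- ===== PRECONDITION & SPEC =====
-- Pre_ excludes rows with fewer than 2 fields, on which both Pythons raise IndexError.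
def Pre_sense_inventory_umn (instance_list : List (List String)) : Prop :=
  ∀ r ∈ instance_list, 2 ≤ r.length
instance (instance_list : List (List String)) : Decidable (Pre_sense_inventory_umn instance_list) := by unfold Pre_sense_inventory_umn; infer_instance

def pvWitness_sense_inventory_umn : List (List String) :=
  [["ABR", "sense one"], ["ABR", "sense two"], ["XY", "s"], ["ABR", "sense one"]]

def Spec_sense_inventory_umn (instance_list : List (List String)) (out : List (String × List String)) : Prop := out = sense_inventory_umn_alt instance_list
instance (instance_list : List (List String)) (out : List (String × List String)) : Decidable (Spec_sense_inventory_umn instance_list out) := by unfold Spec_sense_inventory_umn; infer_instance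

-- ===== CLAIM =====
def Claim_equal_sense_inventory_umn : Prop := ∀ (instance_list : List (List String)), Dom_sense_inventory_umn instance_list → Pre_sense_inventory_umn instance_list → Spec_sense_inventory_umn instance_list (sense_inventory_umn instance_list)

-- ===== LEMMAS AND PROOFS =====

lemma fld0_cons2 (a s : String) (r : List String) : fld0 (a :: s :: r) = a := by
  have h : (0:Int) ≤ (r.length:Int) + 1 := by positivity
  simp [fld0, PySem.List.pyGet?, PySem.List.pyIdx?, h]

lemma fld1_cons2 (a s : String) (r : List String) : fld1 (a :: s :: r) = s := by
  have h : (0:Int) ≤ (r.length:Int) + 1 := by positivity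
  simp [fld1, PySem.List.pyGet?, PySem.List.pyIdx?]

lemma pyGet?_cons2_zero (a s : String) (r : List String) : PySem.List.pyGet? (a :: s :: r) 0 = some a := by
  have h : (0:Int) ≤ (r.length:Int) + 1 := by positivity
  simp [PySem.List.pyGet?, PySem.List.pyIdx?, h]

lemma pyGet?_cons2_one (a s : String) (r : List String) : PySem.List.pyGet? (a :: s :: r) 1 = some s := by
  have h : (0:Int) ≤ (r.length:Int) + 1 := by positivity
  simp [PySem.List.pyGet?, PySem.List.pyIdx?]

lemma dedup_append_singleton (v : List String) (s : String) :
    PySem.List.dedup (v ++ [s]) = if s ∈ PySem.List.dedup v then PySem.List.dedup v else PySem.List.dedup v ++ [s] := by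
  simp [PySem.List.dedup_eq_ofList, PySem.Set.ofList_append_singleton, PySem.Set.add_eq_ite]

-- B's per-abbreviation value as a function of the scanned prefix
def valB (l : List (List String)) (x : String) : List String :=
  PySem.List.dedup ((l.filter (fun items => fld0 items == x)).map fld1)

lemma filter_empty_of_not_mem (l : List (List String)) (x : String)
    (hx : x ∉ l.map fld0) : l.filter (fun items => fld0 items == x) = [] := by
  rw [List.filter_eq_nil_iff]
  intro r hr hbe
  exact hx (List.mem_map.mpr ⟨r, hr, (beq_iff_eq.mp hbe)⟩)

-- invariant: after folding a prefix l, A's dict has keys = B's abbrs and values = B's per-key dedup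
lemma fold_inv (l : List (List String)) (hl : ∀ r ∈ l, 2 ≤ r.length) :
    (l.foldl stepA PySem.Dict.empty).keys = PySem.List.dedup (l.map fld0) ∧
    (∀ x, (l.foldl stepA PySem.Dict.empty).getD x [] = valB l x) := by
  induction l using List.reverseRecOn with
  | nil => exact ⟨rfl, fun x => rfl⟩
  | append_singleton t row ih =>
    obtain ⟨hk, hv⟩ := ih (fun r hr => hl r (List.mem_append_left _ hr))
    match row, hl row (List.mem_append_right _ (List.mem_singleton_self _)) with
    | a :: s :: r, _ =>
    set d := t.foldl stepA PySem.Dict.empty with hd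
    rw [List.foldl_append]
    have hstep : (a :: s :: r) :: [] = [a :: s :: r] := rfl
    have hA : List.foldl stepA d [a :: s :: r] = stepA d (a :: s :: r) := rfl
    have hmap : (t ++ [a :: s :: r]).map fld0 = t.map fld0 ++ [a] := by
      simp [fld0_cons2]
    have hdedup : PySem.List.dedup ((t ++ [a :: s :: r]).map fld0)
        = if a ∈ PySem.List.dedup (t.map fld0) then PySem.List.dedup (t.map fld0)
          else PySem.List.dedup (t.map fld0) ++ [a] := by
      rw [hmap, dedup_append_singleton]
    have hval : ∀ x, valB (t ++ [a :: s :: r]) x =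
        if a = x then (if s ∈ valB t x then valB t x else valB t x ++ [s]) else valB t x := by
      intro x
      unfold valB
      rw [List.filter_append]
      by_cases hax : a = x
      · simp [fld0_cons2, hax, fld1_cons2, PySem.Set.ofList_append_singleton, PySem.Set.add_eq_ite]
      · simp [fld0_cons2, hax]
    have hsA : stepA d (a :: s :: r) =
        (let cur := d.getD a [];
         let d' := d.setdefault a [];
         if s ∈ cur then d' else d'.insert a (cur ++ [s])) := by
      simp only [stepA, pyGet?_cons2_zero, pyGet?_cons2_one]
    by_cases hc : d.contains a = true
    · -- a already a key
      have hsd : d.setdefault a [] = d := PySem.Dict.setdefault_of_contains d [] hc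
      have hmemk : a ∈ PySem.List.dedup (t.map fld0) := by
        rw [← hk]; exact (PySem.Dict.contains_iff_mem_keys d a).mp hc
      rw [hA, hsA]
      simp only [hsd]
      by_cases hs : s ∈ d.getD a []
      · rw [if_pos hs]
        refine ⟨by rw [hdedup, if_pos hmemk, hk], fun x => ?_⟩
        rw [hval x, hv x]
        by_cases hax : a = x
        · subst hax; rw [if_pos rfl, if_pos (by rw [← hv a]; exact hs)]
        · rw [if_neg hax]
      · rw [if_neg hs]
        refine ⟨?_, fun x => ?_⟩
        · rw [PySem.Dict.keys_insert_of_contains _ _ hc, hdedup, if_pos hmemk, hk]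
        · rw [hval x]
          by_cases hax : a = x
          · subst hax
            rw [if_pos rfl, if_neg (by rw [← hv a]; exact hs), PySem.Dict.getD_insert_self, hv a]
          · rw [if_neg hax, PySem.Dict.getD_insert_of_ne _ _ _ (fun h => hax h.symm), hv x]
    · -- a is fresh
      have hc' : d.contains a = false := by simpa using hc
      have hnk : a ∉ PySem.List.dedup (t.map fld0) := by
        rw [← hk]
        intro hm
        rw [(PySem.Dict.contains_iff_mem_keys d a).mpr hm] at hc'
        simp at hc'
      have hnm : a ∉ t.map fld0 := fun h => hnk ((PySem.List.mem_dedup (t.map fld0) a).mpr h)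
      have hcur : d.getD a [] = [] := PySem.Dict.getD_of_not_contains d [] hc'
      have hvala : valB t a = [] := by
        unfold valB; rw [filter_empty_of_not_mem t a hnm]; rfl
      have hsd : d.setdefault a [] = d.insert a [] := PySem.Dict.setdefault_of_not_contains d [] hc'
      rw [hA, hsA]
      simp only [hsd, hcur]
      rw [if_neg (List.not_mem_nil), PySem.Dict.insert_insert_self]
      refine ⟨?_, fun x => ?_⟩
      · rw [PySem.Dict.keys_insert_of_not_contains _ _ hc', hdedup, if_neg hnk, hk]
      · rw [hval x]
        by_cases hax : a = x
        · subst hax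
          rw [if_pos rfl, hvala, if_neg (List.not_mem_nil), PySem.Dict.getD_insert_self]
        · rw [if_neg hax, PySem.Dict.getD_insert_of_ne _ _ _ (fun h => hax h.symm), hv x]

-- ===== VERDICT (by name: the statement is the Claim_ definition above) =====
theorem sense_inventory_umn_spec : Claim_equal_sense_inventory_umn := by
  intro l _ hpre
  unfold Spec_sense_inventory_umn sense_inventory_umn sense_inventory_umn_alt
  obtain ⟨hk, hv⟩ := fold_inv l hpre
  have hnd : (l.foldl stepA PySem.Dict.empty).keys.Nodup := by
    rw [hk, PySem.List.dedup_eq_ofList]; exact PySem.Set.nodup_ofList _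
  rw [PySem.Dict.items_eq_map_keys _ hnd [], hk]
  exact List.map_congr_left (fun k _ => by rw [hv k]; rfl)
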